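-- pv_equiv track=rewrite | github.com/BabakHemmatian/ISAAC_Sampler_Backend | app.py | compute_per_file_quotas
-- ===== SOURCE A (Python) =====
-- from typing import Optional, List, Dict, Tuple, Callable, Any, Iterable
--
-- def compute_per_file_quotas(files: List[Dict[str, Any]], num_docs: int) -> List[int]:
--     if not files:
--         return []
--
--     capacities = [max(0, int(f.get("num_rows") or 0)) for f in files]
--     quotas = [0] * len(files)
--     active = [i for i, cap in enumerate(capacities) if cap > 0]
--     remaining = max(0, int(num_docs))
--
--     while active and remaining > 0:
--         base = max(1, remaining // len(active))
--         next_active = []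
--         for idx in active:
--             cap_left = capacities[idx] - quotas[idx]
--             if cap_left <= 0:
--                 continue
--             take = min(base, cap_left, remaining)
--             quotas[idx] += take
--             remaining -= take
--             if quotas[idx] < capacities[idx]:
--                 next_active.append(idx)
--             if remaining <= 0:
--                 break
--         active = next_active
--
--     if remaining > 0:
--         for idx, cap in sorted(enumerate(capacities), key=lambda x: x[1] - quotas[x[0]], reverse=True):
--             cap_left = cap - quotas[idx]
--             if cap_left <= 0:
--                 continue
--             take = min(cap_left, remaining)
--             quotas[idx] += take
--             remaining -= take
--             if remaining <= 0:
--                 break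
--
--     return quotas
-- ===== SOURCE B (Python) =====
-- from typing import Optional, List, Dict, Tuple, Callable, Any, Iterable
--
-- def compute_per_file_quotas(files: List[Dict[str, Any]], num_docs: int) -> List[int]:
--     if not files:
--         return []
--     caps = [max(0, int(f.get("num_rows") or 0)) for f in files]
--     r = max(0, int(num_docs))
--     total = sum(caps)
--     if r >= total:
--         return caps[:]
--     # binary search the highest water level t with sum(min(c, t)) <= r
--     lo, hi = 0, max(caps)
--     while lo < hi:
--         mid = (lo + hi + 1) // 2
--         if sum(min(c, mid) for c in caps) <= r:
--             lo = mid
--         else: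
--             hi = mid - 1
--     t = lo
--     extras = r - sum(min(c, t) for c in caps)
--     out = []
--     for c in caps:
--         q = min(c, t)
--         if extras > 0 and c > t:
--             q += 1
--             extras -= 1
--         out.append(q)
--     return out
-- ===== Notes on version B (the rewrite author's own statement) =====
-- stated objective: alternative
-- what changed: Replaces A's multi-round round-robin distribution loop (with an active-index worklist and a dead leftover pass) by a closed-form water-filling: binary-search the highest level t with sum(min(cap,t)) <= num_docs, give each file min(cap,t), and hand the remainder out as +1 to the first files above the level.
import Mathlib
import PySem

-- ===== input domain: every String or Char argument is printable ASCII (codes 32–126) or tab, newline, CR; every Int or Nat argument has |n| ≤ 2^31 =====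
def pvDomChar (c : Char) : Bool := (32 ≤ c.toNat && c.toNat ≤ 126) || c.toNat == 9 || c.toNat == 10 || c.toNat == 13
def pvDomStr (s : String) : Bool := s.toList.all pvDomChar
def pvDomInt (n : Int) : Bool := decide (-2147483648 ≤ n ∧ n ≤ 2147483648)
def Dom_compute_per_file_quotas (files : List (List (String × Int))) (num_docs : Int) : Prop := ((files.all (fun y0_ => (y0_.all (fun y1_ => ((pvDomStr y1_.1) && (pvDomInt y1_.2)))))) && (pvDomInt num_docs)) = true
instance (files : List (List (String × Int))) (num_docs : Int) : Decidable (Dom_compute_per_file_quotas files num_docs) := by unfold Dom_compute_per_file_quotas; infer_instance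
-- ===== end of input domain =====

-- B is an alternative exact algorithm: instead of A's multi-round round-robin distribution it
-- binary-searches the water level t with Σ min(cap,t) ≤ num_docs and assigns min(cap,t) (+1 for
-- the first leftover files above the level) in one pass.

-- ===== PORT A =====
-- inner 'for idx in active' loop: returns (quotas, remaining, next_active); stops early on remaining ≤ 0
def pvInnerA (caps : List Int) (base : Int) : List Int → List Int → Int → (List Int × Int × List Int)
  | [], q, r => (q, r, [])
  | idx :: rest, q, r =>
    let capLeft := PySem.List.pyGetD caps idx 0 - PySem.List.pyGetD q idx 0
    if capLeft ≤ 0 then pvInnerA caps base rest q r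
    else
      let take := min base (min capLeft r)
      let q' := PySem.List.pySetD q idx (PySem.List.pyGetD q idx 0 + take)
      let r' := r - take
      let na := if PySem.List.pyGetD q' idx 0 < PySem.List.pyGetD caps idx 0 then [idx] else []
      if r' ≤ 0 then (q', r', na)
      else
        let res := pvInnerA caps base rest q' r'
        (res.1, res.2.1, na ++ res.2.2)

-- termination helpers for the while loop (the inner pass never increases remaining, keeps it ≥ 0,
-- and if it reports a next_active it strictly decreased remaining)
theorem pvInnerA_bound (caps : List Int) (base : Int) (hb : 1 ≤ base) :
    ∀ (act q : List Int) (r : Int), 0 < r →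
      0 ≤ (pvInnerA caps base act q r).2.1 ∧ (pvInnerA caps base act q r).2.1 ≤ r ∧
      ((pvInnerA caps base act q r).2.2 = [] ∨ (pvInnerA caps base act q r).2.1 < r) := by
  intro act
  induction act with
  | nil => intro q r hr; simp [pvInnerA]; omega
  | cons idx rest ih =>
    intro q r hr
    simp only [pvInnerA]
    by_cases h1 : PySem.List.pyGetD caps idx 0 - PySem.List.pyGetD q idx 0 ≤ 0
    · simpa [h1] using ih q r hr
    · simp only [if_neg h1]
      set take := min base (min (PySem.List.pyGetD caps idx 0 - PySem.List.pyGetD q idx 0) r) with htake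
      have h2 : 1 ≤ take := by
        have : 1 ≤ PySem.List.pyGetD caps idx 0 - PySem.List.pyGetD q idx 0 := by omega
        simp only [htake, le_min_iff]; omega
      have h3 : take ≤ r := by simp only [htake]; omega
      by_cases h4 : r - take ≤ 0
      · simp only [if_pos h4]; refine ⟨by omega, by omega, Or.inr (by omega)⟩
      · simp only [if_neg h4]
        have := ih (PySem.List.pySetD q idx (PySem.List.pyGetD q idx 0 + take)) (r - take) (by omega)
        refine ⟨by omega, by omega, Or.inr (by omega)⟩

-- while active and remaining > 0 — returns (quotas, remaining)
def pvLoopA (caps : List Int) (q : List Int) (active : List Int) (r : Int) : List Int × Int :=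
  if h : active ≠ [] ∧ 0 < r then
    let base := max 1 (PySem.Int.floordiv r (PySem.List.len active))
    let res := pvInnerA caps base active q r
    pvLoopA caps res.1 res.2.2 res.2.1
  else (q, r)
termination_by (r.toNat, active.length)
decreasing_by
  · have hb : (1:Int) ≤ max 1 (PySem.Int.floordiv r (PySem.List.len active)) := le_max_left _ _
    have hB := pvInnerA_bound caps _ hb active q r h.2
    rcases hB.2.2 with hna | hlt
    · rcases lt_or_eq_of_le hB.2.1 with hlt | heq
      · exact Prod.Lex.left _ _ (by omega)
      · rw [heq]
        exact Prod.Lex.right _ (by rw [hna]; simpa using List.length_pos_iff.mpr h.1)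
    · exact Prod.Lex.left _ _ (by omega)

-- final 'if remaining > 0' pass over sorted(enumerate(capacities), key=cap_left, reverse=True)
def pvPassGo : List (Int × Int) → List Int → Int → List Int
  | [], q, _ => q
  | (idx, cap) :: rest, q, r =>
    let capLeft := cap - PySem.List.pyGetD q idx 0
    if capLeft ≤ 0 then pvPassGo rest q r
    else
      let take := min capLeft r
      let q' := PySem.List.pySetD q idx (PySem.List.pyGetD q idx 0 + take)
      let r' := r - take
      if r' ≤ 0 then q' else pvPassGo rest q' r'

def compute_per_file_quotas (files : List (List (String × Int))) (num_docs : Int) : List Int :=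
  if files = [] then []
  else
    let capacities := files.map (fun f => max 0 (((PySem.Dict.mk f).get? "num_rows").getD 0))
    let quotas := List.replicate files.length (0 : Int)
    let active := ((PySem.List.enumerate capacities).filter (fun p => 0 < p.2)).map (·.1)
    let remaining := max 0 num_docs
    let res := pvLoopA capacities quotas active remaining
    if 0 < res.2 then
      pvPassGo (PySem.List.sorted (PySem.List.enumerate capacities)
        (fun x => x.2 - PySem.List.pyGetD res.1 x.1 0) true) res.1 res.2
    else res.1

-- ===== PORT B =====
def pvCapsB (files : List (List (String × Int))) : List Int :=
  files.map (fun f => max 0 (((PySem.Dict.mk f).get? "num_rows").getD 0))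

-- sum(min(c, t) for c in caps)
def pvSumMin (caps : List Int) (t : Int) : Int := (caps.map (fun c => min c t)).sum

-- binary search: largest t in [lo, hi] with pvSumMin caps t ≤ r
def pvBSearch (caps : List Int) (r lo hi : Int) : Int :=
  if h : lo < hi then
    let mid := PySem.Int.floordiv (lo + hi + 1) 2
    if pvSumMin caps mid ≤ r then pvBSearch caps r mid hi
    else pvBSearch caps r lo (mid - 1)
  else lo
termination_by (hi - lo).toNat
decreasing_by
  all_goals
    have h2 : PySem.Int.floordiv (lo + hi + 1) 2 = (lo + hi + 1) / 2 :=
      PySem.Int.floordiv_eq_ediv_of_pos (by omega)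
    omega

-- the final assignment pass ('for c in caps: …')
def pvAssign : List Int → Int → Int → List Int
  | [], _, _ => []
  | c :: rest, t, e =>
    if 0 < e ∧ t < c then (min c t + 1) :: pvAssign rest t (e - 1)
    else min c t :: pvAssign rest t e

def compute_per_file_quotas_alt (files : List (List (String × Int))) (num_docs : Int) : List Int :=
  if files = [] then []
  else
    let caps := pvCapsB files
    let r := max 0 num_docs
    let total := caps.sum
    if total ≤ r then caps
    else
      let t := pvBSearch caps r 0 ((PySem.List.max? caps (fun x => x)).getD 0)
      pvAssign caps t (r - pvSumMin caps t)

-- ===== PRECONDITION & SPEC =====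
def Spec_compute_per_file_quotas (files : List (List (String × Int))) (num_docs : Int) (out : List Int) : Prop := out = compute_per_file_quotas_alt files num_docs
instance (files : List (List (String × Int))) (num_docs : Int) (out : List Int) : Decidable (Spec_compute_per_file_quotas files num_docs out) := by unfold Spec_compute_per_file_quotas; infer_instance

-- ===== CLAIM (what is proved, stated in full; the proofs are below) =====
def Claim_equal_compute_per_file_quotas : Prop := ∀ (files : List (List (String × Int))) (num_docs : Int), Dom_compute_per_file_quotas files num_docs → Spec_compute_per_file_quotas files num_docs (compute_per_file_quotas files num_docs)

-- ===== LEMMAS AND PROOFS =====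

-- proof-side views of the loop state
def pvMins (caps : List Int) (S : Int) : List Int := caps.map (fun c => min c S)

def pvActN (caps : List Int) (S : Int) : List Nat :=
  (List.range caps.length).filter (fun i => decide (S < caps.getD i 0))

-- basic getD/set facts
theorem pv_getD_set (q : List Int) (i j : Nat) (v : Int) (hj : j < q.length) :
    (q.set j v).getD i 0 = if i = j then v else q.getD i 0 := by
  by_cases hi : i < q.length
  · by_cases hij : i = j
    · subst hij; simp [List.getD, hi]
    · simp [List.getD, List.getElem?_set, hij, Ne.symm hij]
  · have h2 : ¬ i = j := by omega
    rw [if_neg h2]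
    show ((q.set j v)[i]?).getD 0 = (q[i]?).getD 0
    rw [List.getElem?_eq_none_iff.mpr (by simp; omega),
        List.getElem?_eq_none_iff.mpr (by omega)]

theorem pv_length_foldl_set (l : List Nat) (f : Nat → Int) (q : List Int) :
    (l.foldl (fun acc j => acc.set j (f j)) q).length = q.length := by
  induction l generalizing q with
  | nil => rfl
  | cons j t ih => simpa using ih (q.set j (f j))

theorem pv_getD_foldl_set (l : List Nat) (f : Nat → Int) (q : List Int) (i : Nat)
    (hl : ∀ j ∈ l, j < q.length) :
    (l.foldl (fun acc j => acc.set j (f j)) q).getD i 0 =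
      if i ∈ l then f i else q.getD i 0 := by
  induction l generalizing q with
  | nil => simp
  | cons j t ih =>
    have hj : j < q.length := hl j (by simp)
    have ht : ∀ x ∈ t, x < (q.set j (f j)).length := by
      intro x hx; simpa using hl x (by simp [hx])
    rw [List.foldl_cons, ih _ ht]
    by_cases hit : i ∈ t
    · rw [if_pos hit, if_pos (by simp [hit])]
    · rw [if_neg hit, pv_getD_set _ _ _ _ hj]
      by_cases hij : i = j
      · subst hij; rw [if_pos rfl, if_pos (by simp)]
      · rw [if_neg hij, if_neg (by simp [hij, hit])]

-- pvMins / pvActN facts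
theorem pv_length_mins (caps : List Int) (S : Int) : (pvMins caps S).length = caps.length := by
  simp [pvMins]

theorem pv_getD_mins (caps : List Int) (S : Int) (i : Nat) (hi : i < caps.length) :
    (pvMins caps S).getD i 0 = min (caps.getD i 0) S := by
  simp [pvMins, List.getD, List.getElem?_map, List.getElem?_eq_getElem hi]

theorem pv_mem_actN (caps : List Int) (S : Int) (i : Nat) :
    i ∈ pvActN caps S ↔ i < caps.length ∧ S < caps.getD i 0 := by
  simp [pvActN]

theorem pv_nodup_actN (caps : List Int) (S : Int) : (pvActN caps S).Nodup :=
  (List.nodup_range).filter _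

-- pvSumMin facts
theorem pv_sumMin_mono (caps : List Int) {s t : Int} (h : s ≤ t) :
    pvSumMin caps s ≤ pvSumMin caps t := by
  induction caps with
  | nil => simp [pvSumMin]
  | cons c cs ih => simp only [pvSumMin, List.map_cons, List.sum_cons] at *; omega

theorem pv_sumMin_le_sum (caps : List Int) (t : Int) : pvSumMin caps t ≤ caps.sum := by
  induction caps with
  | nil => simp [pvSumMin]
  | cons c cs ih => simp only [pvSumMin, List.map_cons, List.sum_cons] at *; omega

theorem pv_sumMin_zero (caps : List Int) (hc : ∀ c ∈ caps, 0 ≤ c) :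
    pvSumMin caps 0 = 0 := by
  induction caps with
  | nil => simp [pvSumMin]
  | cons c cs ih =>
    have h1 : 0 ≤ c := hc c (by simp)
    have h2 := ih (fun c hc' => hc c (by simp [hc']))
    simp only [pvSumMin, List.map_cons, List.sum_cons] at *; omega

theorem pv_sumMin_succ (caps : List Int) (S : Int) :
    pvSumMin caps (S + 1) = pvSumMin caps S + (caps.countP (fun c => decide (S < c)) : Int) := by
  induction caps with
  | nil => simp [pvSumMin]
  | cons c cs ih =>
    simp only [pvSumMin, List.map_cons, List.sum_cons, List.countP_cons] at *
    by_cases h : S < c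
    · simp only [h, decide_true, if_true]; push_cast; omega
    · simp only [h, decide_false]; push_cast; omega

theorem pv_sumMin_of_all_le (caps : List Int) (S : Int) (h : ∀ c ∈ caps, c ≤ S) :
    pvSumMin caps S = caps.sum ∧ pvMins caps S = caps := by
  induction caps with
  | nil => simp [pvSumMin, pvMins]
  | cons c cs ih =>
    have h1 : c ≤ S := h c (by simp)
    have h2 := ih (fun c hc' => h c (by simp [hc']))
    constructor
    · have := h2.1
      simp only [pvSumMin, List.map_cons, List.sum_cons] at *; omega
    · have := h2.2
      simp only [pvMins, List.map_cons] at *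
      rw [min_eq_left h1, this]

theorem pv_map_getD_range (caps : List Int) (f : Int → Int) :
    (List.range caps.length).map (fun i => f (caps.getD i 0)) = caps.map f := by
  induction caps with
  | nil => simp
  | cons c cs ih =>
    rw [List.length_cons, List.range_succ_eq_map, List.map_cons, List.map_map]
    simpa using ih

theorem pv_length_actN (caps : List Int) (S : Int) :
    (pvActN caps S).length = caps.countP (fun c => decide (S < c)) := by
  have h : (List.range caps.length).map (fun i => caps.getD i 0) = caps := by
    simpa using pv_map_getD_range caps id
  conv_rhs => rw [← h]
  rw [pvActN, List.countP_map, ← List.countP_eq_length_filter]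
  rfl

-- uniqueness of the water level
theorem pv_T_eq (caps : List Int) (r0 T S : Int)
    (h1 : pvSumMin caps T ≤ r0) (h2 : r0 < pvSumMin caps (T + 1))
    (h3 : pvSumMin caps S ≤ r0) (h4 : r0 < pvSumMin caps (S + 1)) : T = S := by
  by_contra hne
  rcases lt_or_gt_of_ne hne with h | h
  · exact absurd (pv_sumMin_mono caps (show T + 1 ≤ S by omega)) (by omega)
  · exact absurd (pv_sumMin_mono caps (show S + 1 ≤ T by omega)) (by omega)

-- pvAssign facts
theorem pv_length_assign (caps : List Int) (t e : Int) :
    (pvAssign caps t e).length = caps.length := by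
  induction caps generalizing e with
  | nil => simp [pvAssign]
  | cons c cs ih => by_cases h : 0 < e ∧ t < c <;> simp [pvAssign, h, ih]

theorem pv_assign_nonpos (caps : List Int) (t e : Int) (he : e ≤ 0) :
    pvAssign caps t e = pvMins caps t := by
  induction caps generalizing e with
  | nil => simp [pvAssign, pvMins]
  | cons c cs ih =>
    have h : ¬ (0 < e ∧ t < c) := by omega
    simp only [pvAssign, pvMins, List.map_cons]
    rw [if_neg h]
    have h2 := ih e he
    simp only [pvMins] at h2
    rw [h2]

theorem pv_assign_getD (caps : List Int) (t : Int) :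
    ∀ (e : Int) (i : Nat), i < caps.length →
      (pvAssign caps t e).getD i 0 =
        if t < caps.getD i 0 ∧ (((caps.take i).countP (fun c => decide (t < c)) : Int) < e)
        then min (caps.getD i 0) t + 1 else min (caps.getD i 0) t := by
  induction caps with
  | nil => intro e i hi; simp at hi
  | cons c cs ih =>
    intro e i hi
    cases i with
    | zero =>
      simp only [pvAssign]
      by_cases h : 0 < e ∧ t < c
      · rw [if_pos h]
        simp only [List.getD_cons_zero, List.take_zero, List.countP_nil, Nat.cast_zero]
        rw [if_pos ⟨h.2, h.1⟩]
      · rw [if_neg h]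
        simp only [List.getD_cons_zero, List.take_zero, List.countP_nil, Nat.cast_zero]
        rw [if_neg (by omega)]
    | succ j =>
      have hj : j < cs.length := by simpa using hi
      simp only [pvAssign]
      by_cases h : 0 < e ∧ t < c
      · rw [if_pos h, List.getD_cons_succ, ih (e - 1) j hj]
        simp only [List.take_succ_cons, List.countP_cons, h.2, decide_true, if_true,
          List.getD_cons_succ]
        by_cases hc : t < cs.getD j 0
        · have hiff : ((List.countP (fun c => decide (t < c)) (cs.take j) : Nat) : Int) < e - 1 ↔
              ((List.countP (fun c => decide (t < c)) (cs.take j) + 1 : Nat) : Int) < e := by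
            push_cast; omega
          simp only [hc, true_and]
          by_cases h2 : ((List.countP (fun c => decide (t < c)) (cs.take j) : Nat) : Int) < e - 1
          · rw [if_pos h2, if_pos (hiff.mp h2)]
          · rw [if_neg h2, if_neg (fun x => h2 (hiff.mpr x))]
        · rw [if_neg (fun x => hc x.1), if_neg (fun x => hc x.1)]
      · rw [if_neg h, List.getD_cons_succ, ih e j hj]
        simp only [List.take_succ_cons, List.countP_cons, List.getD_cons_succ]
        by_cases htc : t < c
        · have he : ¬ (0:Int) < e := fun x => h ⟨x, htc⟩
          have c1 : ¬ (t < cs.getD j 0 ∧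
              ((List.countP (fun c => decide (t < c)) (cs.take j) : Nat) : Int) < e) := by
            rintro ⟨-, hlt⟩
            have : (0:Int) ≤ ((List.countP (fun c => decide (t < c)) (cs.take j) : Nat) : Int) :=
              Int.natCast_nonneg _
            omega
          have c2 : ¬ (t < cs.getD j 0 ∧
              ((List.countP (fun c => decide (t < c)) (cs.take j) +
                (if decide (t < c) = true then 1 else 0) : Nat) : Int) < e) := by
            rintro ⟨-, hlt⟩
            have : (0:Int) ≤ ((List.countP (fun c => decide (t < c)) (cs.take j) +
                (if decide (t < c) = true then 1 else 0) : Nat) : Int) := Int.natCast_nonneg _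
            omega
          rw [if_neg c1, if_neg c2]
        · simp [htc]


-- sum over the active indices vs pvSumMin
theorem pv_filter_map_sum_sub {α : Type} (l : List α) (P : α → Bool) (F G : α → Int)
    (h : ∀ x ∈ l, ¬ P x = true → F x = G x) :
    ((l.filter P).map F).sum - ((l.filter P).map G).sum = (l.map F).sum - (l.map G).sum := by
  induction l with
  | nil => simp
  | cons x xs ih =>
    have ih' := ih (fun y hy => h y (by simp [hy]))
    by_cases hx : P x = true
    · simp only [List.filter_cons, hx, if_true, List.map_cons, List.sum_cons]; omega
    · have hFG := h x (by simp) hx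
      simp only [List.filter_cons, hx, if_false, List.map_cons, List.sum_cons, Bool.false_eq_true]
      omega

theorem pv_actN_delta (caps : List Int) (S b : Int) (hb : 0 ≤ b) :
    ((pvActN caps S).map (fun i => min (caps.getD i 0) (S + b))).sum -
      ((pvActN caps S).map (fun i => min (caps.getD i 0) S)).sum =
      pvSumMin caps (S + b) - pvSumMin caps S := by
  have h := pv_filter_map_sum_sub (List.range caps.length)
    (fun i => decide (S < caps.getD i 0))
    (fun i => min (caps.getD i 0) (S + b)) (fun i => min (caps.getD i 0) S)
    (by intro x _ hx; simp only [decide_eq_true_eq] at hx; simp only []; omega)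
  rw [pvActN]
  rw [h, pv_map_getD_range caps (fun c => min c (S + b)), pv_map_getD_range caps (fun c => min c S)]
  rfl

theorem pv_sum_map_le_const (l : List Nat) (F : Nat → Int) (b : Int)
    (h : ∀ i ∈ l, F i ≤ b) : (l.map F).sum ≤ (l.length : Int) * b := by
  induction l with
  | nil => simp
  | cons x xs ih =>
    have h1 := h x (by simp)
    have h2 := ih (fun y hy => h y (by simp [hy]))
    simp only [List.map_cons, List.sum_cons, List.length_cons]
    push_cast; nlinarith [h1, h2]

theorem pv_const_le_sum_map (l : List Nat) (F : Nat → Int) (b : Int)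
    (h : ∀ i ∈ l, b ≤ F i) : (l.length : Int) * b ≤ (l.map F).sum := by
  induction l with
  | nil => simp
  | cons x xs ih =>
    have h1 := h x (by simp)
    have h2 := ih (fun y hy => h y (by simp [hy]))
    simp only [List.map_cons, List.sum_cons, List.length_cons]
    push_cast; nlinarith [h1, h2]

-- first-m-elements of a filtered range
theorem pv_mem_take_filter_range (p : Nat → Bool) :
    ∀ (n m i : Nat), (i ∈ ((List.range n).filter p).take m ↔
      i < n ∧ p i = true ∧ ((List.range i).filter p).length < m) := by
  intro n
  induction n with
  | zero => intro m i; simp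
  | succ n ih =>
    intro m i
    rw [List.range_succ, List.filter_append, List.take_append, List.mem_append]
    have hsub : ∀ x ∈ ((List.range n).filter p).take m, x < n := by
      intro x hx
      have := List.mem_filter.mp (List.mem_of_mem_take hx)
      simpa using List.mem_range.mp this.1
    by_cases hin : i < n
    · have h2 : i ∉ (List.filter p [n]).take (m - ((List.range n).filter p).length) := by
        intro hmem
        have := List.mem_of_mem_take hmem
        simp only [List.filter_cons, List.filter_nil] at this
        by_cases hpn : p n = true
        · simp [hpn] at this; omega
        · simp [hpn] at this
      constructor
      · rintro (h | h)
        · rcases (ih m i).mp h with ⟨-, h2', h3⟩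
          exact ⟨by omega, h2', h3⟩
        · exact absurd h h2
      · rintro ⟨-, h2', h3⟩
        exact Or.inl ((ih m i).mpr ⟨hin, h2', h3⟩)
    · by_cases hi : i = n
      · subst hi
        have h1 : i ∉ ((List.range i).filter p).take m := fun h => absurd (hsub i h) (by omega)
        simp only [List.filter_cons, List.filter_nil]
        by_cases hpn : p i = true
        · simp only [hpn, if_true]
          constructor
          · rintro (h | h)
            · exact absurd h h1
            · have hlen : 0 < m - ((List.range i).filter p).length := by
                by_contra hz
                have hz' : m - ((List.range i).filter p).length = 0 := by omega
                rw [hz'] at h; simp at h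
              exact ⟨by omega, by simp [hpn], by omega⟩
          · rintro ⟨-, -, hlen⟩
            right
            have htk : ([i].take (m - ((List.range i).filter p).length)) = [i] := by
              apply List.take_of_length_le; simp; omega
            rw [htk]; simp
        · constructor
          · rintro (h | h)
            · exact absurd h h1
            · simp [hpn] at h
          · rintro ⟨-, hp, -⟩; exact absurd hp hpn
      · have hgt : n < i := by omega
        constructor
        · rintro (h | h)
          · exact absurd (hsub i h) (by omega)
          · have := List.mem_of_mem_take h
            simp only [List.filter_cons, List.filter_nil] at this
            by_cases hpn : p n = true
            · simp [hpn] at this; omega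
            · simp [hpn] at this
        · rintro ⟨h, -, -⟩; omega

-- rank of index i: filtered range below i = countP on the prefix of caps
theorem pv_countP_take (caps : List Int) (p : Int → Bool) :
    ∀ i, i ≤ caps.length →
      ((List.range i).filter (fun j => p (caps.getD j 0))).length =
        (caps.take i).countP p := by
  intro i
  induction i with
  | zero => intro _; simp
  | succ k ih =>
    intro hk
    have hk' : k < caps.length := by omega
    rw [List.range_succ, List.filter_append, List.length_append, ih (by omega)]
    have ht : caps.take (k + 1) = caps.take k ++ [caps[k]] := by
      rw [List.take_add_one, List.getElem?_eq_getElem hk']; rfl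
    rw [ht, List.countP_append]
    simp only [List.filter_cons, List.filter_nil, List.countP_cons, List.countP_nil]
    have : caps.getD k 0 = caps[k] := List.getD_eq_getElem caps 0 hk'
    rw [this]
    by_cases hp : p caps[k] = true <;> simp [hp]


theorem pv_sum_map_sub {α : Type} (l : List α) (f g : α → Int) :
    (l.map (fun x => f x - g x)).sum = (l.map f).sum - (l.map g).sum := by
  induction l with
  | nil => simp
  | cons x xs ih => simp only [List.map_cons, List.sum_cons, ih]; ring

theorem pv_inner_full (caps : List Int) (S b : Int) (hb : 1 ≤ b) :
    ∀ (l : List Nat) (q : List Int) (r : Int),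
      (∀ i ∈ l, i < caps.length ∧ q.getD i 0 = min (caps.getD i 0) S ∧ S < caps.getD i 0) →
      l.Nodup → q.length = caps.length →
      ((l.map (fun i => min (caps.getD i 0) (S + b))).sum
        - (l.map (fun i => min (caps.getD i 0) S)).sum) ≤ r →
      pvInnerA caps b (l.map (fun n : Nat => (n : Int))) q r =
        (l.foldl (fun acc i => acc.set i (min (caps.getD i 0) (S + b))) q,
         r - ((l.map (fun i => min (caps.getD i 0) (S + b))).sum
           - (l.map (fun i => min (caps.getD i 0) S)).sum),
         (l.filter (fun i => decide (S + b < caps.getD i 0))).map (fun n : Nat => (n : Int))) := by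
  intro l
  induction l with
  | nil => intro q r _ _ _ _; simp [pvInnerA]
  | cons i rest ih =>
    intro q r hmem hnd hlen hΔ
    obtain ⟨hi, hqi, hSi⟩ := hmem i (by simp)
    have hqiS : q.getD i 0 = S := by omega
    have hrest_nonneg : 0 ≤ (rest.map (fun j => min (caps.getD j 0) (S + b))).sum
        - (rest.map (fun j => min (caps.getD j 0) S)).sum := by
      have := List.sum_le_sum (l := rest) (f := fun j => min (caps.getD j 0) S)
        (g := fun j => min (caps.getD j 0) (S + b)) (fun j _ => by dsimp only; omega)
      omega
    have hfil : List.filter (fun j => decide (S + b < caps.getD j 0)) (i :: rest)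
        = (if min (caps.getD i 0) (S + b) < caps.getD i 0 then ([i] : List Nat) else [])
          ++ List.filter (fun j => decide (S + b < caps.getD j 0)) rest := by
      rw [List.filter_cons]
      by_cases hx : S + b < caps.getD i 0
      · rw [if_pos (by simpa using hx), if_pos (by omega)]; rfl
      · rw [if_neg (by simpa using hx), if_neg (by omega)]; rfl
    have hifmap : List.map (fun n : Nat => (n : Int))
          (if min (caps.getD i 0) (S + b) < caps.getD i 0 then ([i] : List Nat) else [])
        = (if min (caps.getD i 0) (S + b) < caps.getD i 0 then ([(i : Int)]) else []) := by
      split <;> rfl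
    simp only [List.map_cons, List.sum_cons] at hΔ ⊢
    simp only [pvInnerA, PySem.List.pyGetD_natCast, PySem.List.pySetD_natCast]
    rw [hqiS, if_neg (by omega)]
    have htake : min b (min (caps.getD i 0 - S) r) = min (caps.getD i 0) (S + b) - S := by
      omega
    rw [htake]
    have hsetv : S + (min (caps.getD i 0) (S + b) - S) = min (caps.getD i 0) (S + b) := by ring
    rw [hsetv, pv_getD_set q i i _ (by omega), if_pos rfl, hfil, List.map_append, hifmap]
    by_cases hrest : rest = []
    · subst hrest
      simp only [List.map_nil, List.sum_nil, List.foldl_cons, List.foldl_nil,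
        List.filter_nil, List.append_nil]
      by_cases hr0 : r - (min (caps.getD i 0) (S + b) - S) ≤ 0
      · rw [if_pos hr0]
        exact Prod.ext rfl (Prod.ext (by dsimp only; omega) rfl)
      · rw [if_neg hr0]
        simp only [pvInnerA, List.append_nil]
        exact Prod.ext rfl (Prod.ext (by dsimp only; omega) rfl)
    · have hrlen : 1 ≤ rest.length := List.length_pos_iff.mpr hrest
      have hrestΔ : (rest.length : Int) ≤ (rest.map (fun j => min (caps.getD j 0) (S + b))).sum
          - (rest.map (fun j => min (caps.getD j 0) S)).sum := by
        rw [← pv_sum_map_sub]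
        have := pv_const_le_sum_map rest
          (fun j => min (caps.getD j 0) (S + b) - min (caps.getD j 0) S) 1
          (fun j hj => by
            obtain ⟨-, -, hSj⟩ := hmem j (by simp [hj])
            dsimp only; omega)
        omega
      rw [if_neg (by omega)]
      have hine : i ∉ rest := (List.nodup_cons.mp hnd).1
      rw [ih (q.set i (min (caps.getD i 0) (S + b)))
        (r - (min (caps.getD i 0) (S + b) - S))
        (by
          intro j hj
          obtain ⟨h1, h2, h3⟩ := hmem j (by simp [hj])
          refine ⟨h1, ?_, h3⟩
          rw [pv_getD_set q j i _ (by omega), if_neg (by rintro rfl; exact hine hj)]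
          exact h2)
        (List.nodup_cons.mp hnd).2 (by simpa using hlen) (by omega)]
      rw [List.foldl_cons]
      exact Prod.ext rfl (Prod.ext (by dsimp only; omega) rfl)

theorem pv_inner_break (caps : List Int) (S : Int) :
    ∀ (l : List Nat) (q : List Int) (r : Int),
      (∀ i ∈ l, i < caps.length ∧ q.getD i 0 = min (caps.getD i 0) S ∧ S < caps.getD i 0) →
      l.Nodup → q.length = caps.length → 0 < r → r < (l.length : Int) →
      ∃ na, pvInnerA caps 1 (l.map (fun n : Nat => (n : Int))) q r =
        ((l.take r.toNat).foldl (fun acc i => acc.set i (S + 1)) q, 0, na) := by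
  intro l
  induction l with
  | nil => intro q r _ _ _ h1 h2; simp at h2; omega
  | cons i rest ih =>
    intro q r hmem hnd hlen hr0 hrlen
    obtain ⟨hi, hqi, hSi⟩ := hmem i (by simp)
    have hqiS : q.getD i 0 = S := by omega
    simp only [List.map_cons, pvInnerA, PySem.List.pyGetD_natCast, PySem.List.pySetD_natCast]
    rw [hqiS, if_neg (by omega)]
    have htake : min 1 (min (caps.getD i 0 - S) r) = 1 := by omega
    rw [htake]
    have htk : (i :: rest).take r.toNat = i :: rest.take (r.toNat - 1) := by
      have h : r.toNat = (r.toNat - 1) + 1 := by omega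
      rw [h]; rfl
    by_cases hr1 : r - 1 ≤ 0
    · rw [if_pos hr1]
      have hr : r.toNat = 1 := by omega
      refine ⟨_, Prod.ext ?_ (Prod.ext (by dsimp only; omega) rfl)⟩
      rw [htk, hr]
      simp
    · rw [if_neg hr1]
      have hine : i ∉ rest := (List.nodup_cons.mp hnd).1
      obtain ⟨na, hna⟩ := ih (q.set i (S + 1)) (r - 1)
        (by
          intro j hj
          obtain ⟨h1, h2, h3⟩ := hmem j (by simp [hj])
          refine ⟨h1, ?_, h3⟩
          rw [pv_getD_set q j i _ (by omega), if_neg (by rintro rfl; exact hine hj)]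
          exact h2)
        (List.nodup_cons.mp hnd).2 (by simpa using hlen) (by omega)
        (by simp only [List.length_cons] at hrlen; push_cast at hrlen ⊢; omega)
      rw [hna]
      have h2 : (r - 1).toNat = r.toNat - 1 := by omega
      refine ⟨_, Prod.ext ?_ (Prod.ext rfl rfl)⟩
      rw [htk, List.foldl_cons, h2]


theorem pv_foldl_set_mins (caps : List Int) (S b : Int) (hb : 0 ≤ b) :
    (pvActN caps S).foldl (fun acc i => acc.set i (min (caps.getD i 0) (S + b))) (pvMins caps S)
      = pvMins caps (S + b) := by
  apply List.ext_getElem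
  · rw [pv_length_foldl_set, pv_length_mins, pv_length_mins]
  · intro n h1 h2
    have hn : n < caps.length := by rwa [pv_length_foldl_set, pv_length_mins] at h1
    rw [← List.getD_eq_getElem _ 0 h1, ← List.getD_eq_getElem _ 0 h2]
    rw [pv_getD_foldl_set _ _ _ _ (by
      intro j hj; rw [pv_length_mins]; exact ((pv_mem_actN caps S j).mp hj).1)]
    rw [pv_getD_mins caps (S + b) n hn]
    by_cases hmem : n ∈ pvActN caps S
    · rw [if_pos hmem]
    · rw [if_neg hmem, pv_getD_mins caps S n hn]
      have hc : ¬ (n < caps.length ∧ S < caps.getD n 0) := fun h => hmem ((pv_mem_actN caps S n).mpr h)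
      have : ¬ S < caps.getD n 0 := fun h => hc ⟨hn, h⟩
      omega

theorem pv_actN_filter (caps : List Int) (S b : Int) (hb : 0 ≤ b) :
    (pvActN caps S).filter (fun i => decide (S + b < caps.getD i 0)) = pvActN caps (S + b) := by
  rw [pvActN, pvActN, List.filter_filter]
  apply List.filter_congr
  intro i _
  by_cases hx : S + b < caps.getD i 0
  · have hx2 : S < caps.getD i 0 := by omega
    rw [decide_eq_true hx, decide_eq_true hx2]
    rfl
  · rw [decide_eq_false hx]
    rfl

theorem pv_bumped_eq_assign (caps : List Int) (S r : Int) (hr : 0 < r) :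
    ((pvActN caps S).take r.toNat).foldl (fun acc i => acc.set i (S + 1)) (pvMins caps S)
      = pvAssign caps S r := by
  apply List.ext_getElem
  · rw [pv_length_foldl_set, pv_length_mins, pv_length_assign]
  · intro n h1 h2
    have hn : n < caps.length := by rwa [pv_length_foldl_set, pv_length_mins] at h1
    rw [← List.getD_eq_getElem _ 0 h1, ← List.getD_eq_getElem _ 0 h2]
    rw [pv_getD_foldl_set _ _ _ _ (by
      intro j hj
      rw [pv_length_mins]
      exact ((pv_mem_actN caps S j).mp (List.mem_of_mem_take hj)).1)]
    rw [pv_assign_getD caps S r n hn]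
    have hmemiff : n ∈ (pvActN caps S).take r.toNat ↔
        n < caps.length ∧ (decide (S < caps.getD n 0)) = true ∧
        ((List.range n).filter (fun i => decide (S < caps.getD i 0))).length < r.toNat := by
      rw [pvActN]
      exact pv_mem_take_filter_range (fun i => decide (S < caps.getD i 0)) caps.length r.toNat n
    have hrank := pv_countP_take caps (fun c => decide (S < c)) n (le_of_lt hn)
    by_cases hmem : n ∈ (pvActN caps S).take r.toNat
    · rw [if_pos hmem]
      obtain ⟨-, hp, hlt⟩ := hmemiff.mp hmem
      have hc : S < caps.getD n 0 := by simpa using hp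
      rw [hrank] at hlt
      have hcnt : (((caps.take n).countP (fun c => decide (S < c)) : Nat) : Int) < r := by
        omega
      rw [if_pos ⟨hc, hcnt⟩]
      omega
    · rw [if_neg hmem, pv_getD_mins _ _ _ hn]
      have hncond : ¬ (S < caps.getD n 0 ∧
          (((caps.take n).countP (fun c => decide (S < c)) : Nat) : Int) < r) := by
        rintro ⟨hc, hcnt⟩
        exact hmem (hmemiff.mpr ⟨hn, by simpa using hc, by rw [hrank]; omega⟩)
      rw [if_neg hncond]

theorem pv_bsearch_spec (caps : List Int) (r : Int) :
    ∀ (m : Nat) (lo hi : Int), (hi - lo).toNat ≤ m → lo ≤ hi →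
      pvSumMin caps lo ≤ r → ¬ pvSumMin caps (hi + 1) ≤ r →
      lo ≤ pvBSearch caps r lo hi ∧ pvBSearch caps r lo hi ≤ hi ∧
      pvSumMin caps (pvBSearch caps r lo hi) ≤ r ∧
      ¬ pvSumMin caps (pvBSearch caps r lo hi + 1) ≤ r := by
  intro m
  induction m with
  | zero =>
    intro lo hi hm hle hP hQ
    have heq : lo = hi := by omega
    rw [pvBSearch, dif_neg (by omega)]
    exact ⟨le_rfl, by omega, hP, by rw [heq]; exact hQ⟩
  | succ m ih =>
    intro lo hi hm hle hP hQ
    by_cases hlh : lo < hi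
    · have h2 : PySem.Int.floordiv (lo + hi + 1) 2 = (lo + hi + 1) / 2 :=
        PySem.Int.floordiv_eq_ediv_of_pos (by omega)
      have hmid : lo < PySem.Int.floordiv (lo + hi + 1) 2 ∧
          PySem.Int.floordiv (lo + hi + 1) 2 ≤ hi := by omega
      rw [pvBSearch, dif_pos hlh]
      by_cases hPm : pvSumMin caps (PySem.Int.floordiv (lo + hi + 1) 2) ≤ r
      · rw [if_pos hPm]
        obtain ⟨a, b, c, d⟩ := ih (PySem.Int.floordiv (lo + hi + 1) 2) hi (by omega)
          (by omega) hPm hQ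
        exact ⟨by omega, b, c, d⟩
      · rw [if_neg hPm]
        have hQ' : ¬ pvSumMin caps (PySem.Int.floordiv (lo + hi + 1) 2 - 1 + 1) ≤ r := by
          have he : PySem.Int.floordiv (lo + hi + 1) 2 - 1 + 1
              = PySem.Int.floordiv (lo + hi + 1) 2 := by ring
          rw [he]; exact hPm
        obtain ⟨a, b, c, d⟩ := ih lo (PySem.Int.floordiv (lo + hi + 1) 2 - 1) (by omega)
          (by omega) hP hQ'
        exact ⟨a, by omega, c, d⟩
    · rw [pvBSearch, dif_neg hlh]
      have heq : lo = hi := by omega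
      exact ⟨le_rfl, by omega, hP, by rw [heq]; exact hQ⟩

theorem pv_pass_skip : ∀ (l : List (Int × Int)) (q : List Int) (r : Int),
    (∀ p ∈ l, p.2 - PySem.List.pyGetD q p.1 0 ≤ 0) → pvPassGo l q r = q := by
  intro l
  induction l with
  | nil => intro q r _; rfl
  | cons p rest ih =>
    intro q r h
    obtain ⟨idx, cap⟩ := p
    simp only [pvPassGo]
    rw [if_pos (h (idx, cap) (by simp))]
    exact ih q r (fun p hp => h p (by simp [hp]))


theorem pv_caps_le_of_actN_nil (caps : List Int) (S : Int) (hemp : pvActN caps S = []) :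
    ∀ c ∈ caps, c ≤ S := by
  intro c hcmem
  obtain ⟨i, hi, rfl⟩ := List.mem_iff_getElem.mp hcmem
  by_contra hlt
  have : i ∈ pvActN caps S := (pv_mem_actN caps S i).mpr
    ⟨hi, by rw [List.getD_eq_getElem caps 0 hi]; omega⟩
  rw [hemp] at this
  simp at this

theorem pv_countP_pos_of_actN_ne (caps : List Int) (S : Int) (hne : pvActN caps S ≠ []) :
    1 ≤ (caps.countP (fun c => decide (S < c)) : Int) := by
  have := pv_length_actN caps S
  have h2 : 0 < (pvActN caps S).length := List.length_pos_iff.mpr hne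
  omega

theorem pv_loop_exit (caps : List Int) (r0 T S : Int)
    (hT : ¬ caps.sum ≤ r0 → (pvSumMin caps T ≤ r0 ∧ ¬ pvSumMin caps (T + 1) ≤ r0))
    (hle : pvSumMin caps S ≤ r0)
    (hstop : pvActN caps S ≠ [] → r0 - pvSumMin caps S = 0) :
    pvLoopA caps (pvMins caps S) ((pvActN caps S).map (fun n : Nat => (n : Int)))
        (r0 - pvSumMin caps S) =
      (if caps.sum ≤ r0 then (caps, r0 - caps.sum)
       else (pvAssign caps T (r0 - pvSumMin caps T), 0)) := by
  by_cases hemp : pvActN caps S = []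
  · have hall := pv_caps_le_of_actN_nil caps S hemp
    obtain ⟨hsum, hmins⟩ := pv_sumMin_of_all_le caps S hall
    rw [pvLoopA, dif_neg (by simp [hemp])]
    rw [if_pos (by omega), hmins, hsum]
  · have hr0 : r0 - pvSumMin caps S = 0 := hstop hemp
    have hk1 := pv_countP_pos_of_actN_ne caps S hemp
    have hsucc := pv_sumMin_succ caps S
    have hsum_le := pv_sumMin_le_sum caps (S + 1)
    have hnsum : ¬ caps.sum ≤ r0 := by omega
    rw [pvLoopA, dif_neg (by simp [hr0])]
    rw [if_neg hnsum]
    obtain ⟨hT1, hT2⟩ := hT hnsum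
    have hTS : T = S := pv_T_eq caps r0 T S hT1 (by omega) (by omega) (by omega)
    rw [hTS, pv_assign_nonpos caps S _ (by omega)]
    exact Prod.ext rfl (by dsimp only; omega)

theorem pv_loop_main (caps : List Int) (r0 T : Int)
    (hT : ¬ caps.sum ≤ r0 → (pvSumMin caps T ≤ r0 ∧ ¬ pvSumMin caps (T + 1) ≤ r0)) :
    ∀ (m : Nat) (S : Int), 0 ≤ S → pvSumMin caps S ≤ r0 →
      (r0 - pvSumMin caps S).toNat ≤ m →
      pvLoopA caps (pvMins caps S) ((pvActN caps S).map (fun n : Nat => (n : Int)))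
        (r0 - pvSumMin caps S) =
      (if caps.sum ≤ r0 then (caps, r0 - caps.sum)
       else (pvAssign caps T (r0 - pvSumMin caps T), 0)) := by
  intro m
  induction m with
  | zero =>
    intro S hS hle hm
    exact pv_loop_exit caps r0 T S hT hle (fun _ => by omega)
  | succ m ih =>
    intro S hS hle hm
    by_cases hemp : pvActN caps S = []
    · exact pv_loop_exit caps r0 T S hT hle (fun h => absurd hemp h)
    by_cases hr00 : r0 - pvSumMin caps S = 0
    · exact pv_loop_exit caps r0 T S hT hle (fun _ => hr00)
    have hrpos : 0 < r0 - pvSumMin caps S := by omega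
    have hkpos : 0 < ((pvActN caps S).length : Int) := by
      have := List.length_pos_iff.mpr hemp
      omega
    have hmem' : ∀ i ∈ pvActN caps S, i < caps.length ∧
        (pvMins caps S).getD i 0 = min (caps.getD i 0) S ∧ S < caps.getD i 0 := by
      intro i hi
      obtain ⟨h1, h2⟩ := (pv_mem_actN caps S i).mp hi
      exact ⟨h1, pv_getD_mins caps S i h1, h2⟩
    have hnodup := pv_nodup_actN caps S
    have hlen' : (pvMins caps S).length = caps.length := pv_length_mins caps S
    rw [pvLoopA, dif_pos ⟨by simpa using hemp, hrpos⟩]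
    simp only [PySem.List.len_eq, List.length_map]
    by_cases hrk : ((pvActN caps S).length : Int) ≤ r0 - pvSumMin caps S
    · -- full round with base = (remaining // active count) ≥ 1
      have hfd1 : 1 ≤ PySem.Int.floordiv (r0 - pvSumMin caps S) ((pvActN caps S).length : Int) := by
        rw [PySem.Int.le_floordiv_iff_mul_le hkpos]
        omega
      have hbk : PySem.Int.floordiv (r0 - pvSumMin caps S) ((pvActN caps S).length : Int) *
          ((pvActN caps S).length : Int) ≤ r0 - pvSumMin caps S :=
        (PySem.Int.le_floordiv_iff_mul_le hkpos).mp le_rfl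
      have hbase : max 1 (PySem.Int.floordiv (r0 - pvSumMin caps S) ((pvActN caps S).length : Int))
          = PySem.Int.floordiv (r0 - pvSumMin caps S) ((pvActN caps S).length : Int) :=
        max_eq_right hfd1
      set b := PySem.Int.floordiv (r0 - pvSumMin caps S) ((pvActN caps S).length : Int) with hbdef
      have hΔeq := pv_actN_delta caps S b (by omega)
      have hΔle : pvSumMin caps (S + b) - pvSumMin caps S ≤
          ((pvActN caps S).length : Int) * b := by
        rw [← hΔeq, ← pv_sum_map_sub]
        exact pv_sum_map_le_const _ _ b (fun j hj => by
          obtain ⟨-, -, h3⟩ := hmem' j hj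
          omega)
      have hΔge : ((pvActN caps S).length : Int) ≤ pvSumMin caps (S + b) - pvSumMin caps S := by
        rw [← hΔeq, ← pv_sum_map_sub]
        have := pv_const_le_sum_map (pvActN caps S)
          (fun j => min (caps.getD j 0) (S + b) - min (caps.getD j 0) S) 1
          (fun j hj => by
            obtain ⟨-, -, h3⟩ := hmem' j hj
            dsimp only
            omega)
        omega
      have hΔler : pvSumMin caps (S + b) - pvSumMin caps S ≤ r0 - pvSumMin caps S := by
        have : ((pvActN caps S).length : Int) * b ≤ r0 - pvSumMin caps S := by
          rw [mul_comm] at hbk; exact hbk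
        omega
      rw [hbase, pv_inner_full caps S b hfd1 (pvActN caps S) (pvMins caps S)
        (r0 - pvSumMin caps S) hmem' hnodup hlen' (by rw [hΔeq]; omega)]
      rw [pv_foldl_set_mins caps S b (by omega), pv_actN_filter caps S b (by omega), hΔeq]
      have harg : r0 - pvSumMin caps S - (pvSumMin caps (S + b) - pvSumMin caps S)
          = r0 - pvSumMin caps (S + b) := by ring
      rw [harg]
      exact ih (S + b) (by omega) (by omega) (by omega)
    · -- final partial round: base = 1, remaining < active count
      have hfd0 : PySem.Int.floordiv (r0 - pvSumMin caps S) ((pvActN caps S).length : Int) = 0 := by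
        rw [PySem.Int.floordiv_eq_iff_of_pos hkpos]
        constructor
        · omega
        · omega
      have hbase : max 1 (PySem.Int.floordiv (r0 - pvSumMin caps S) ((pvActN caps S).length : Int))
          = 1 := by rw [hfd0]; rfl
      obtain ⟨na, hna⟩ := pv_inner_break caps S (pvActN caps S) (pvMins caps S)
        (r0 - pvSumMin caps S) hmem' hnodup hlen' hrpos (by omega)
      rw [hbase, hna]
      dsimp only
      rw [pvLoopA, dif_neg (by simp)]
      rw [pv_bumped_eq_assign caps S (r0 - pvSumMin caps S) hrpos]
      have hk1 := pv_countP_pos_of_actN_ne caps S hemp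
      have hsucc := pv_sumMin_succ caps S
      have hsum_le := pv_sumMin_le_sum caps (S + 1)
      have hklen := pv_length_actN caps S
      have hnsum : ¬ caps.sum ≤ r0 := by omega
      rw [if_neg hnsum]
      obtain ⟨hT1, hT2⟩ := hT hnsum
      have hTS : T = S := pv_T_eq caps r0 T S hT1 (by omega) (by omega) (by omega)
      rw [hTS]


theorem pv_replicate_eq_mins (caps : List Int) (n : Nat) (hn : caps.length = n)
    (hc : ∀ c ∈ caps, 0 ≤ c) : List.replicate n (0 : Int) = pvMins caps 0 := by
  apply List.ext_getElem
  · simp [pvMins, hn]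
  · intro i h1 h2
    have hi : i < caps.length := by simpa [pvMins] using h2
    simp only [List.getElem_replicate, pvMins, List.getElem_map]
    have h0 : 0 ≤ caps[i] := hc _ (List.getElem_mem hi)
    omega

theorem pv_active0_eq (caps : List Int) :
    ((PySem.List.enumerate caps).filter (fun p => decide (0 < p.2))).map (fun p => p.1)
      = (pvActN caps 0).map (fun n : Nat => (n : Int)) := by
  rw [PySem.List.enumerate_eq_map_pyRange (d := 0)]
  simp only [PySem.List.len_eq]
  rw [PySem.List.pyRange_zero_nat]
  rw [List.map_map, List.filter_map, List.map_map]
  rw [pvActN]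
  congr 1
  · apply List.filter_congr
    intro i _
    simp

-- ===== VERDICT (by name: the statement is the Claim_ definition above) =====
theorem compute_per_file_quotas_spec : Claim_equal_compute_per_file_quotas := by
  intro files num_docs _
  unfold Spec_compute_per_file_quotas compute_per_file_quotas compute_per_file_quotas_alt pvCapsB
  by_cases hf : files = []
  · rw [if_pos hf, if_pos hf]
  · rw [if_neg hf, if_neg hf]
    dsimp only
    set caps := files.map (fun f => max 0 (((PySem.Dict.mk f).get? "num_rows").getD 0)) with hcaps
    set r0 := max 0 num_docs with hr0def
    have hc : ∀ c ∈ caps, 0 ≤ c := by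
      intro c hcm
      rw [hcaps] at hcm
      obtain ⟨f, -, rfl⟩ := List.mem_map.mp hcm
      exact le_max_left _ _
    have hcne : caps ≠ [] := by
      rw [hcaps]
      simpa using hf
    have hr0 : (0:Int) ≤ r0 := le_max_left _ _
    have hsm0 : pvSumMin caps 0 = 0 := pv_sumMin_zero caps hc
    set mx := (PySem.List.max? caps (fun x => x)).getD 0 with hmxdef
    have hmax : ∀ c ∈ caps, c ≤ mx := by
      intro c hcm
      rcases hmx : PySem.List.max? caps (fun x => x) with _ | m
      · obtain ⟨h0, t0, hct⟩ := List.exists_cons_of_ne_nil hcne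
        rw [hct, PySem.List.max?_id_cons] at hmx
        cases hmx
      · have := PySem.List.max?_isMax hmx c hcm
        rw [hmxdef, hmx]
        simpa using this
    have hmx0 : (0:Int) ≤ mx := le_trans (hc _ (List.exists_mem_of_ne_nil caps hcne).choose_spec)
      (hmax _ (List.exists_mem_of_ne_nil caps hcne).choose_spec)
    set T := pvBSearch caps r0 0 mx with hTdef
    have hTspec : ¬ caps.sum ≤ r0 → (pvSumMin caps T ≤ r0 ∧ ¬ pvSumMin caps (T + 1) ≤ r0) := by
      intro hnsum
      have hQ : ¬ pvSumMin caps (mx + 1) ≤ r0 := by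
        have heq : pvSumMin caps (mx + 1) = caps.sum :=
          (pv_sumMin_of_all_le caps (mx + 1) (fun c h => by have := hmax c h; omega)).1
        omega
      obtain ⟨-, -, c, d⟩ := pv_bsearch_spec caps r0 (mx - 0).toNat 0 mx le_rfl hmx0
        (by rw [hsm0]; exact hr0) hQ
      exact ⟨c, d⟩
    have hmain := pv_loop_main caps r0 T hTspec r0.toNat 0 le_rfl
      (by rw [hsm0]; exact hr0) (by rw [hsm0]; omega)
    rw [hsm0, sub_zero] at hmain
    rw [pv_replicate_eq_mins caps files.length (by simp [hcaps]) hc]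
    rw [pv_active0_eq caps]
    rw [hmain]
    by_cases hsum : caps.sum ≤ r0
    · rw [if_pos hsum, if_pos hsum]
      by_cases hpass : 0 < (caps, r0 - caps.sum).2
      · rw [if_pos hpass]
        dsimp only
        apply pv_pass_skip
        intro p hp
        have hpmem : p ∈ PySem.List.enumerate caps := (PySem.List.mem_sorted _ _ _ _).mp hp
        obtain ⟨k, hk, rfl⟩ := (PySem.List.mem_enumerate_iff _ _ _).mp hpmem
        simp only [zero_add, PySem.List.pyGetD_natCast]
        rw [List.getD_eq_getElem caps 0 hk]
        omega
      · rw [if_neg hpass]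
    · rw [if_neg hsum, if_neg hsum]
      rw [if_neg (by dsimp only; omega)]
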